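-- pv_equiv track=rewrite | github.com/981377660LMT/algorithm-study | 19_数学/组合/分割数/分割数表P(n,k).py | getPartitionTable
-- ===== SOURCE A (Python) =====
-- from typing import List
--
-- MOD = int(1e9 + 7)
--
-- def getPartitionTable(n: int, k: int) -> List[List[int]]:
--     dp = [[0] * (k + 1) for _ in range(n + 1)]
--     dp[0][0] = 1
--     for i in range(n + 1):
--         for j in range(1, k + 1):
--             if i >= j:
--                 dp[i][j] = dp[i][j - 1] + dp[i - j][j]
--             else:
--                 dp[i][j] = dp[i][j - 1]
--             dp[i][j] %= MOD
--     return dp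
-- ===== SOURCE B (Python) =====
-- from typing import List
--
-- MOD = int(1e9 + 7)
--
-- def getPartitionTable(n: int, k: int) -> List[List[int]]:
--     # Different DP: first count partitions into EXACTLY m parts
--     # (q[i][m] = q[i-1][m-1] + q[i-m][m]), then take row-wise prefix sums,
--     # since partitions of i into at most j parts equal partitions of i
--     # into parts of size <= j.
--     q = [[0] * (k + 1) for _ in range(n + 1)]
--     q[0][0] = 1
--     for i in range(1, n + 1):
--         for m in range(1, k + 1):
--             if m <= i:
--                 q[i][m] = (q[i - 1][m - 1] + q[i - m][m]) % MOD
--     dp = [[0] * (k + 1) for _ in range(n + 1)]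
--     for i in range(n + 1):
--         dp[i][0] = q[i][0]
--         for j in range(1, k + 1):
--             dp[i][j] = (dp[i][j - 1] + q[i][j]) % MOD
--     return dp
-- ===== Notes on version B (the rewrite author's own statement) =====
-- stated objective: alternative
-- what changed: Replaces A's single parts-up-to-j recurrence dp[i][j]=dp[i][j-1]+dp[i-j][j] by a two-phase algorithm with a different DP state: first a table of partitions into EXACTLY m parts via q[i][m]=q[i-1][m-1]+q[i-m][m], then row-wise prefix sums over m.
import Mathlib
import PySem

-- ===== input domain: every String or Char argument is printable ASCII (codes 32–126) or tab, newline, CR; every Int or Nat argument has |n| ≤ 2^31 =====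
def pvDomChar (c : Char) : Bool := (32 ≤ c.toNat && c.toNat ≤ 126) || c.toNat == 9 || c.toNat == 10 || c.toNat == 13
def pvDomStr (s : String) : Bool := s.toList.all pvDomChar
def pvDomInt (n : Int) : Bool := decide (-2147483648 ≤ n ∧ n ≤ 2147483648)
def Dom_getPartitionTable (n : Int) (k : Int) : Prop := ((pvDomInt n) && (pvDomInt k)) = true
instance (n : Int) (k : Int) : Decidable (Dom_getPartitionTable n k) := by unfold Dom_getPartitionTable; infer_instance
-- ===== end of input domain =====

-- B computes the table by a different DP: a table of partitions into EXACTLY m parts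
-- (q[i][m] = q[i-1][m-1] + q[i-m][m]) followed by row-wise prefix sums over m;
-- same asymptotic cost, proved to return A's exact table.

-- MOD = int(1e9 + 7)
def MODC : Int := 1000000007

-- dp[a][b] read / write on the list-of-lists grid. Ported by hand with a default of 0 / no-op
-- out of range; exact here because inside Pre_ every index either port uses is proved in range
-- by the lemmas below (both Pythons only touch existing cells).
def pvGet2 (dp : List (List Int)) (i j : Nat) : Int := (dp.getD i []).getD j 0
def pvSet2 (dp : List (List Int)) (i j : Nat) (v : Int) : List (List Int) :=
  dp.set i ((dp.getD i []).set j v)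

-- ===== PORT A =====
-- loop body of A: dp[i][j] = dp[i][j-1] (+ dp[i-j][j] if i >= j), then dp[i][j] %= MOD
def stepA (dp : List (List Int)) (i j : Int) : List (List Int) :=
  let v := if i ≥ j then pvGet2 dp i.toNat (j - 1).toNat + pvGet2 dp (i - j).toNat j.toNat
           else pvGet2 dp i.toNat (j - 1).toNat
  pvSet2 dp i.toNat j.toNat (PySem.Int.mod v MODC)

def getPartitionTable (n : Int) (k : Int) : List (List Int) :=
  let dp0 := pvSet2 (List.replicate (n + 1).toNat (List.replicate (k + 1).toNat 0)) 0 0 1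
  (PySem.List.pyRange 0 (n + 1) 1).foldl (fun dp i =>
    (PySem.List.pyRange 1 (k + 1) 1).foldl (fun dp j => stepA dp i j) dp) dp0

-- ===== PORT B =====
-- phase-1 loop body: if m <= i: q[i][m] = (q[i-1][m-1] + q[i-m][m]) % MOD
def stepQ (g : List (List Int)) (i m : Int) : List (List Int) :=
  if m ≤ i then
    pvSet2 g i.toNat m.toNat
      (PySem.Int.mod (pvGet2 g (i - 1).toNat (m - 1).toNat + pvGet2 g (i - m).toNat m.toNat) MODC)
  else g

-- phase-2 loop body: dp[i][j] = (dp[i][j-1] + q[i][j]) % MOD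
def stepPS (q dp : List (List Int)) (i j : Int) : List (List Int) :=
  pvSet2 dp i.toNat j.toNat
    (PySem.Int.mod (pvGet2 dp i.toNat (j - 1).toNat + pvGet2 q i.toNat j.toNat) MODC)

-- the finished phase-1 table q (helper so phase 2 can read it)
def qTable (n : Int) (k : Int) : List (List Int) :=
  (PySem.List.pyRange 1 (n + 1) 1).foldl (fun g i =>
      (PySem.List.pyRange 1 (k + 1) 1).foldl (fun g m => stepQ g i m) g)
    (pvSet2 (List.replicate (n + 1).toNat (List.replicate (k + 1).toNat 0)) 0 0 1)

def getPartitionTable_alt (n : Int) (k : Int) : List (List Int) :=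
  (PySem.List.pyRange 0 (n + 1) 1).foldl (fun dp i =>
    (PySem.List.pyRange 1 (k + 1) 1).foldl (fun dp j => stepPS (qTable n k) dp i j)
      (pvSet2 dp i.toNat 0 (pvGet2 (qTable n k) i.toNat 0)))
    (List.replicate (n + 1).toNat (List.replicate (k + 1).toNat 0))

-- ===== PRECONDITION & SPEC =====
-- Pre_ excludes n < 0 or k < 0, where A (and B alike) raises IndexError at dp[0][0] = 1
-- (the grid has no row 0 / no column 0 there).
def Pre_getPartitionTable (n : Int) (k : Int) : Prop := 0 ≤ n ∧ 0 ≤ k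
instance (n : Int) (k : Int) : Decidable (Pre_getPartitionTable n k) := by
  unfold Pre_getPartitionTable; infer_instance
def pvWitness_getPartitionTable : Int × Int := (5, 4)

def Spec_getPartitionTable (n : Int) (k : Int) (out : List (List Int)) : Prop := out = getPartitionTable_alt n k
instance (n : Int) (k : Int) (out : List (List Int)) : Decidable (Spec_getPartitionTable n k out) := by unfold Spec_getPartitionTable; infer_instance

-- ===== CLAIM (what is proved, stated in full; the proofs are below) =====
def Claim_equal_getPartitionTable : Prop := ∀ (n : Int) (k : Int), Dom_getPartitionTable n k → Pre_getPartitionTable n k → Spec_getPartitionTable n k (getPartitionTable n k)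

-- ===== LEMMAS AND PROOFS =====

-- mathematical model of A's table: parts of size ≤ j, A's mod discipline
def P : Nat → Nat → Int
  | i, 0 => if i = 0 then 1 else 0
  | i, (j + 1) =>
    if _h : j + 1 ≤ i then PySem.Int.mod (P i j + P (i - (j + 1)) (j + 1)) MODC
    else PySem.Int.mod (P i j) MODC
termination_by i j => (j, i)
decreasing_by
  all_goals first
    | exact Prod.Lex.right _ (by omega)
    | exact Prod.Lex.left _ _ (Nat.lt_succ_self j)

-- mathematical model of B's phase 1: partitions into exactly m parts, mod MOD
def Qn : Nat → Nat → Int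
  | i, 0 => if i = 0 then 1 else 0
  | i, (m + 1) =>
    if _h : m + 1 ≤ i then PySem.Int.mod (Qn (i - 1) m + Qn (i - (m + 1)) (m + 1)) MODC
    else 0
termination_by i m => (m, i)
decreasing_by
  all_goals first
    | exact Prod.Lex.right _ (by omega)
    | exact Prod.Lex.left _ _ (Nat.lt_succ_self m)

-- mathematical model of B's phase 2: row-wise prefix sums of Qn, mod MOD
def Rr : Nat → Nat → Int
  | i, 0 => Qn i 0
  | i, (j + 1) => PySem.Int.mod (Rr i j + Qn i (j + 1)) MODC

def tbl (N K : Nat) (f : Nat → Nat → Int) : List (List Int) :=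
  (List.range N).map fun a => (List.range K).map fun b => f a b

theorem tbl_get (N K : Nat) (f : Nat → Nat → Int) (a b : Nat) (ha : a < N) (hb : b < K) :
    pvGet2 (tbl N K f) a b = f a b := by
  simp [pvGet2, tbl, List.getD_eq_getElem?_getD, ha, hb]

theorem tbl_set (N K : Nat) (f : Nat → Nat → Int) (a b : Nat) (v : Int) (ha : a < N) (_hb : b < K) :
    pvSet2 (tbl N K f) a b v = tbl N K (fun x y => if x = a ∧ y = b then v else f x y) := by
  unfold pvSet2 tbl
  have hrow : ((List.range N).map fun x => (List.range K).map fun y => f x y).getD a [] =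
      (List.range K).map fun y => f a y := by
    rw [List.getD_eq_getElem?_getD]; simp [ha]
  rw [hrow]
  apply List.ext_getElem
  · simp
  intro x hx1 hx2
  simp only [List.getElem_set, List.getElem_map, List.getElem_range]
  split_ifs with h1
  · subst h1
    apply List.ext_getElem
    · simp
    intro y hy1 hy2
    simp only [List.getElem_set, List.getElem_map, List.getElem_range]
    by_cases h2 : b = y
    · subst h2; simp
    · rw [if_neg h2, if_neg (by rintro ⟨-, h⟩; exact h2 h.symm)]
  · apply List.map_congr_left
    intro y hy
    rw [if_neg]
    rintro ⟨h, -⟩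
    exact h1 h.symm

theorem tbl_congr (N K : Nat) (f g : Nat → Nat → Int)
    (h : ∀ a, a < N → ∀ b, b < K → f a b = g a b) : tbl N K f = tbl N K g := by
  unfold tbl
  apply List.map_congr_left
  intro a ha
  apply List.map_congr_left
  intro b hb
  exact h a (List.mem_range.mp ha) b (List.mem_range.mp hb)

theorem tbl_init (N K : Nat) :
    List.replicate N (List.replicate K (0 : Int)) = tbl N K (fun _ _ => 0) := by
  simp [tbl, List.map_const']

theorem P_bounds (i j : Nat) : 0 ≤ P i j ∧ P i j < MODC := by
  cases j with
  | zero => rw [P]; split <;> exact ⟨by decide, by decide⟩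
  | succ j =>
    rw [P]
    split <;>
      exact ⟨PySem.Int.mod_nonneg _ (by decide),
             PySem.Int.mod_lt _ (by decide)⟩

theorem P_mod (i j : Nat) : PySem.Int.mod (P i j) MODC = P i j := by
  obtain ⟨h1, h2⟩ := P_bounds i j
  rw [PySem.Int.mod_eq_emod_of_pos (by decide : (0:Int) < MODC)]
  exact Int.emod_eq_of_lt h1 h2

theorem P_succ_le (i j : Nat) (h : j + 1 ≤ i) :
    P i (j + 1) = PySem.Int.mod (P i j + P (i - (j + 1)) (j + 1)) MODC := by
  rw [P]; simp [h]

theorem P_succ_gt (i j : Nat) (h : i < j + 1) : P i (j + 1) = P i j := by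
  rw [P, dif_neg (by omega : ¬ j + 1 ≤ i)]
  exact P_mod i j

theorem Qn_succ_le (i m : Nat) (h : m + 1 ≤ i) :
    Qn i (m + 1) = PySem.Int.mod (Qn (i - 1) m + Qn (i - (m + 1)) (m + 1)) MODC := by
  rw [Qn]; simp [h]

theorem Qn_bounds (i m : Nat) : 0 ≤ Qn i m ∧ Qn i m < MODC := by
  cases m with
  | zero => rw [Qn]; split <;> exact ⟨by decide, by decide⟩
  | succ m =>
    rw [Qn]
    split
    · exact ⟨PySem.Int.mod_nonneg _ (by decide), PySem.Int.mod_lt _ (by decide)⟩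
    · exact ⟨by decide, by decide⟩

theorem Rr_bounds (i j : Nat) : 0 ≤ Rr i j ∧ Rr i j < MODC := by
  cases j with
  | zero => rw [Rr]; exact Qn_bounds i 0
  | succ j =>
    rw [Rr]
    exact ⟨PySem.Int.mod_nonneg _ (by decide), PySem.Int.mod_lt _ (by decide)⟩

theorem Rr_mod (i j : Nat) : PySem.Int.mod (Rr i j) MODC = Rr i j := by
  obtain ⟨h1, h2⟩ := Rr_bounds i j
  rw [PySem.Int.mod_eq_emod_of_pos (by decide : (0:Int) < MODC)]
  exact Int.emod_eq_of_lt h1 h2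

-- key identity: exactly m parts of i = at most m parts of i - m  (mod-level, by induction on m)
theorem Qn_eq_Rr (m i : Nat) (h : m ≤ i) : Qn i m = Rr (i - m) m := by
  induction m generalizing i with
  | zero => simp [Rr]
  | succ m ih =>
    rw [Qn, dif_pos h, Rr, ih (i - 1) (by omega)]
    have : i - 1 - m = i - (m + 1) := by omega
    rw [this]

-- A's table function equals B's prefix-sum function
theorem P_eq_Rr (j i : Nat) : P i j = Rr i j := by
  induction j generalizing i with
  | zero => rw [P, Rr, Qn]
  | succ j ih =>
    induction i using Nat.strong_induction_on with
    | _ i ihi =>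
      by_cases h : j + 1 ≤ i
      · rw [P, dif_pos h, Rr, ih i, Qn_eq_Rr (j + 1) i h,
          ← ihi (i - (j + 1)) (by omega), P]
      · rw [P, dif_neg h, P_mod, ih i, Rr]
        have hq : Qn i (j + 1) = 0 := by rw [Qn, dif_neg h]
        rw [hq, add_zero, Rr_mod]

-- ---------- simulation of A ----------

def gA (i j a b : Nat) : Int := if a < i ∨ (a = i ∧ b ≤ j) then P a b else 0

theorem gA_point (N K i j : Nat) :
    tbl N K (fun a b => if a = i ∧ b = j + 1 then P i (j + 1) else gA i j a b) =
      tbl N K (gA i (j + 1)) := by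
  apply tbl_congr; intro a ha b hb
  by_cases hab : a = i ∧ b = j + 1
  · obtain ⟨rfl, rfl⟩ := hab
    rw [if_pos ⟨rfl, rfl⟩]; unfold gA
    rw [if_pos (Or.inr ⟨rfl, le_refl _⟩)]
  · rw [if_neg hab]; unfold gA
    split_ifs with h1 h2 <;> try rfl
    · exfalso; omega
    · exfalso; exact hab (by omega)

theorem stepA_tbl (N K i j : Nat) (hi : i < N) (hj : j + 1 < K) :
    stepA (tbl N K (gA i j)) (i : Int) ((j : Int) + 1) = tbl N K (gA i (j + 1)) := by
  unfold stepA
  have e1 : ((j : Int) + 1).toNat = j + 1 := by omega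
  have e2 : ((j : Int) + 1 - 1).toNat = j := by omega
  have e3 : ((i : Int)).toNat = i := by omega
  have g1 : gA i j i j = P i j := by
    unfold gA; rw [if_pos (Or.inr ⟨rfl, le_refl j⟩)]
  by_cases h : (i : Int) ≥ (j : Int) + 1
  · have hji : j + 1 ≤ i := by omega
    have e4 : ((i : Int) - ((j : Int) + 1)).toNat = i - (j + 1) := by omega
    rw [if_pos h, e1, e2, e3, e4,
      tbl_get _ _ _ _ _ hi (by omega), tbl_get _ _ _ _ _ (by omega) hj]
    have g2 : gA i j (i - (j + 1)) (j + 1) = P (i - (j + 1)) (j + 1) := by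
      unfold gA; rw [if_pos (Or.inl (by omega))]
    rw [g1, g2, tbl_set _ _ _ _ _ _ hi hj, ← P_succ_le i j hji]
    exact gA_point N K i j
  · have hji : i < j + 1 := by omega
    rw [if_neg h, e1, e2, e3, tbl_get _ _ _ _ _ hi (by omega), g1,
      tbl_set _ _ _ _ _ _ hi hj, P_mod, ← P_succ_gt i j hji]
    exact gA_point N K i j

theorem rowA (N K i : Nat) (hi : i < N) (j : Nat) (hj : j < K) :
    (PySem.List.pyRange 1 ((j : Int) + 1) 1).foldl (fun dp jv => stepA dp (i : Int) jv)
      (tbl N K (gA i 0)) = tbl N K (gA i j) := by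
  induction j with
  | zero =>
    simp only [Nat.cast_zero, zero_add]
    rw [PySem.List.pyRange_one_eq_nil (le_refl 1)]
    rfl
  | succ j ih =>
    have hc : ((j + 1 : Nat) : Int) + 1 = ((j : Int) + 1) + 1 := by push_cast; ring
    rw [hc, PySem.List.pyRange_one_succ_right (by omega : (1 : Int) ≤ (j : Int) + 1),
      List.foldl_append, ih (by omega), List.foldl_cons, List.foldl_nil]
    have hc2 : ((j : Int) + 1) = ((j + 1 : Nat) : Int) := by push_cast; ring
    rw [hc2]
    exact stepA_tbl N K i j hi hj

theorem outerA (N K : Nat) (hK : 1 ≤ K) (i : Nat) (hi : i ≤ N) :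
    (PySem.List.pyRange 0 (i : Int) 1).foldl
      (fun dp iv => (PySem.List.pyRange 1 (K : Int) 1).foldl (fun dp jv => stepA dp iv jv) dp)
      (tbl N K (gA 0 0)) = tbl N K (gA i 0) := by
  induction i with
  | zero =>
    simp only [Nat.cast_zero]
    rw [PySem.List.pyRange_one_eq_nil (le_refl 0)]
    rfl
  | succ i ih =>
    have hc : ((i + 1 : Nat) : Int) = (i : Int) + 1 := by push_cast; ring
    rw [hc, PySem.List.pyRange_one_succ_right (by omega : (0 : Int) ≤ (i : Int)),
      List.foldl_append, ih (by omega), List.foldl_cons, List.foldl_nil]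
    have hK1 : (K : Int) = ((K - 1 : Nat) : Int) + 1 := by omega
    rw [hK1, rowA N K i (by omega) (K - 1) (by omega)]
    apply tbl_congr; intro a ha b hb
    unfold gA
    split_ifs with h1 h2 <;> try rfl
    · exfalso; omega
    · have hab : a = i + 1 ∧ b = 0 := by omega
      obtain ⟨rfl, rfl⟩ := hab
      rw [P]; simp

theorem dp0_tbl (N K : Nat) (hN : 1 ≤ N) (hK : 1 ≤ K) :
    pvSet2 (List.replicate N (List.replicate K (0 : Int))) 0 0 1 =
      tbl N K (fun a b => if a = 0 ∧ b = 0 then 1 else 0) := by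
  rw [tbl_init, tbl_set N K _ 0 0 1 (by omega) (by omega)]

theorem A_eq_tbl (N K : Nat) (hN : 1 ≤ N) (hK : 1 ≤ K) :
    (PySem.List.pyRange 0 (N : Int) 1).foldl
      (fun dp i => (PySem.List.pyRange 1 (K : Int) 1).foldl (fun dp j => stepA dp i j) dp)
      (pvSet2 (List.replicate N (List.replicate K (0 : Int))) 0 0 1) = tbl N K P := by
  rw [dp0_tbl N K hN hK]
  have h0 : tbl N K (fun a b => if a = 0 ∧ b = 0 then 1 else 0) = tbl N K (gA 0 0) := by
    apply tbl_congr; intro a ha b hb; unfold gA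
    split_ifs with h1 h2 <;> try rfl
    · obtain ⟨rfl, rfl⟩ := h1; rw [P]; simp
    · exfalso; omega
    · exfalso; omega
  rw [h0, outerA N K hK N (le_refl N)]
  apply tbl_congr; intro a ha b hb
  unfold gA; rw [if_pos (Or.inl ha)]

-- ---------- simulation of B, phase 1 ----------

def initQ (a b : Nat) : Int := if a = 0 ∧ b = 0 then 1 else 0

-- unwritten cells already hold their Qn value
theorem Qn_initQ (a b : Nat) (h : b = 0 ∨ a < b) : Qn a b = initQ a b := by
  cases b with
  | zero => rw [Qn]; unfold initQ; split_ifs <;> omega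
  | succ b =>
    have hab : a < b + 1 := by omega
    rw [Qn, dif_neg (by omega)]
    unfold initQ; rw [if_neg (by omega)]

def hQ (i m a b : Nat) : Int := if a < i ∨ (a = i ∧ b ≤ m) then Qn a b else initQ a b

theorem hQ_point (N K i m : Nat) :
    tbl N K (fun a b => if a = i ∧ b = m + 1 then Qn i (m + 1) else hQ i m a b) =
      tbl N K (hQ i (m + 1)) := by
  apply tbl_congr; intro a ha b hb
  by_cases hab : a = i ∧ b = m + 1
  · obtain ⟨rfl, rfl⟩ := hab
    rw [if_pos ⟨rfl, rfl⟩]; unfold hQ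
    rw [if_pos (Or.inr ⟨rfl, le_refl _⟩)]
  · rw [if_neg hab]; unfold hQ
    split_ifs with h1 h2 <;> try rfl
    · exfalso; omega
    · exfalso; exact hab (by omega)

theorem stepQ_tbl (N K i m : Nat) (hi1 : 1 ≤ i) (hi : i < N) (hm : m + 1 < K) :
    stepQ (tbl N K (hQ i m)) (i : Int) ((m : Int) + 1) = tbl N K (hQ i (m + 1)) := by
  unfold stepQ
  by_cases h : (m : Int) + 1 ≤ (i : Int)
  · have hmi : m + 1 ≤ i := by omega
    have e1 : ((i : Int)).toNat = i := by omega
    have e2 : ((m : Int) + 1).toNat = m + 1 := by omega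
    have e3 : ((i : Int) - 1).toNat = i - 1 := by omega
    have e4 : ((m : Int) + 1 - 1).toNat = m := by omega
    have e5 : ((i : Int) - ((m : Int) + 1)).toNat = i - (m + 1) := by omega
    rw [if_pos h, e1, e2, e3, e4, e5,
      tbl_get _ _ _ _ _ (by omega) (by omega), tbl_get _ _ _ _ _ (by omega) hm]
    have g1 : hQ i m (i - 1) m = Qn (i - 1) m := by
      unfold hQ; rw [if_pos (Or.inl (by omega))]
    have g2 : hQ i m (i - (m + 1)) (m + 1) = Qn (i - (m + 1)) (m + 1) := by
      unfold hQ
      by_cases hz : i - (m + 1) < i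
      · rw [if_pos (Or.inl hz)]
      · exfalso; omega
    rw [g1, g2, tbl_set _ _ _ _ _ _ hi hm, ← Qn_succ_le i m hmi]
    exact hQ_point N K i m
  · rw [if_neg h]
    apply tbl_congr; intro a ha b hb
    unfold hQ
    by_cases hab : a = i ∧ b = m + 1
    · obtain ⟨rfl, rfl⟩ := hab
      rw [if_neg (by omega), if_pos (Or.inr ⟨rfl, le_refl _⟩)]
      exact (Qn_initQ a (m + 1) (Or.inr (by omega))).symm
    · split_ifs with h1 h2 <;> try rfl
      · exfalso; omega
      · exfalso; exact hab (by omega)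

theorem rowQ (N K i : Nat) (hi1 : 1 ≤ i) (hi : i < N) (m : Nat) (hm : m < K) :
    (PySem.List.pyRange 1 ((m : Int) + 1) 1).foldl (fun g mv => stepQ g (i : Int) mv)
      (tbl N K (hQ i 0)) = tbl N K (hQ i m) := by
  induction m with
  | zero =>
    simp only [Nat.cast_zero, zero_add]
    rw [PySem.List.pyRange_one_eq_nil (le_refl 1)]
    rfl
  | succ m ih =>
    have hc : ((m + 1 : Nat) : Int) + 1 = ((m : Int) + 1) + 1 := by push_cast; ring
    rw [hc, PySem.List.pyRange_one_succ_right (by omega : (1 : Int) ≤ (m : Int) + 1),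
      List.foldl_append, ih (by omega), List.foldl_cons, List.foldl_nil]
    have hc2 : ((m : Int) + 1) = ((m + 1 : Nat) : Int) := by push_cast; ring
    rw [hc2]
    exact stepQ_tbl N K i m hi1 hi hm

theorem outerQ (N K : Nat) (hK : 1 ≤ K) (i : Nat) (hi1 : 1 ≤ i) (hi : i ≤ N) :
    (PySem.List.pyRange 1 (i : Int) 1).foldl
      (fun g iv => (PySem.List.pyRange 1 (K : Int) 1).foldl (fun g mv => stepQ g iv mv) g)
      (tbl N K (hQ 1 0)) = tbl N K (hQ i 0) := by
  induction i with
  | zero => exact absurd hi1 (by omega)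
  | succ i ih =>
    by_cases h1 : i = 0
    · subst h1
      rw [PySem.List.pyRange_one_eq_nil (by norm_num : ((0 + 1 : Nat) : Int) ≤ 1)]
      rfl
    · have hc : ((i + 1 : Nat) : Int) = (i : Int) + 1 := by push_cast; ring
      rw [hc, PySem.List.pyRange_one_succ_right (by omega : (1 : Int) ≤ (i : Int)),
        List.foldl_append, ih (by omega) (by omega), List.foldl_cons, List.foldl_nil]
      have hK1 : (K : Int) = ((K - 1 : Nat) : Int) + 1 := by omega
      rw [hK1, rowQ N K i (by omega) (by omega) (K - 1) (by omega)]
      apply tbl_congr; intro a ha b hb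
      unfold hQ
      split_ifs with h1 h2 <;> try rfl
      · exfalso; omega
      · have hab : a = i + 1 ∧ b = 0 := by omega
        obtain ⟨rfl, rfl⟩ := hab
        exact (Qn_initQ (i + 1) 0 (Or.inl rfl)).symm

theorem Q_eq_tbl (N K : Nat) (hN : 1 ≤ N) (hK : 1 ≤ K) :
    (PySem.List.pyRange 1 (N : Int) 1).foldl
      (fun g i => (PySem.List.pyRange 1 (K : Int) 1).foldl (fun g m => stepQ g i m) g)
      (pvSet2 (List.replicate N (List.replicate K (0 : Int))) 0 0 1) = tbl N K Qn := by
  rw [dp0_tbl N K hN hK]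
  have h0 : tbl N K (fun a b => if a = 0 ∧ b = 0 then 1 else 0) = tbl N K (hQ 1 0) := by
    apply tbl_congr; intro a ha b hb; unfold hQ
    by_cases h : a < 1 ∨ (a = 1 ∧ b ≤ 0)
    · rw [if_pos h]
      rcases h with h | ⟨rfl, hb0⟩
      · have : a = 0 := by omega
        subst this
        exact (Qn_initQ 0 b (by omega)).symm
      · have : b = 0 := by omega
        subst this
        exact (Qn_initQ 1 0 (Or.inl rfl)).symm
    · rw [if_neg h]; rfl
  rw [h0, outerQ N K hK N (by omega) (le_refl N)]
  apply tbl_congr; intro a ha b hb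
  unfold hQ
  by_cases h : a < N ∨ (a = N ∧ b ≤ 0)
  · rw [if_pos h]
  · exfalso; omega

-- ---------- simulation of B, phase 2 ----------

def hR (i j a b : Nat) : Int := if a < i ∨ (a = i ∧ b ≤ j) then Rr a b else 0

theorem hR_point (N K i j : Nat) :
    tbl N K (fun a b => if a = i ∧ b = j + 1 then Rr i (j + 1) else hR i j a b) =
      tbl N K (hR i (j + 1)) := by
  apply tbl_congr; intro a ha b hb
  by_cases hab : a = i ∧ b = j + 1
  · obtain ⟨rfl, rfl⟩ := hab
    rw [if_pos ⟨rfl, rfl⟩]; unfold hR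
    rw [if_pos (Or.inr ⟨rfl, le_refl _⟩)]
  · rw [if_neg hab]; unfold hR
    split_ifs with h1 h2 <;> try rfl
    · exfalso; omega
    · exfalso; exact hab (by omega)

theorem stepPS_tbl (N K i j : Nat) (hi : i < N) (hj : j + 1 < K) :
    stepPS (tbl N K Qn) (tbl N K (hR i j)) (i : Int) ((j : Int) + 1) =
      tbl N K (hR i (j + 1)) := by
  unfold stepPS
  have e1 : ((i : Int)).toNat = i := by omega
  have e2 : ((j : Int) + 1).toNat = j + 1 := by omega
  have e3 : ((j : Int) + 1 - 1).toNat = j := by omega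
  rw [e1, e2, e3, tbl_get _ _ _ _ _ hi (by omega), tbl_get _ _ _ _ _ hi hj]
  have g1 : hR i j i j = Rr i j := by
    unfold hR; rw [if_pos (Or.inr ⟨rfl, le_refl _⟩)]
  rw [g1, tbl_set _ _ _ _ _ _ hi hj]
  have hv : PySem.Int.mod (Rr i j + Qn i (j + 1)) MODC = Rr i (j + 1) := by rw [Rr]
  rw [hv]
  exact hR_point N K i j

theorem rowPS (N K i : Nat) (hi : i < N) (j : Nat) (hj : j < K) :
    (PySem.List.pyRange 1 ((j : Int) + 1) 1).foldl
      (fun dp jv => stepPS (tbl N K Qn) dp (i : Int) jv)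
      (tbl N K (hR i 0)) = tbl N K (hR i j) := by
  induction j with
  | zero =>
    simp only [Nat.cast_zero, zero_add]
    rw [PySem.List.pyRange_one_eq_nil (le_refl 1)]
    rfl
  | succ j ih =>
    have hc : ((j + 1 : Nat) : Int) + 1 = ((j : Int) + 1) + 1 := by push_cast; ring
    rw [hc, PySem.List.pyRange_one_succ_right (by omega : (1 : Int) ≤ (j : Int) + 1),
      List.foldl_append, ih (by omega), List.foldl_cons, List.foldl_nil]
    have hc2 : ((j : Int) + 1) = ((j + 1 : Nat) : Int) := by push_cast; ring
    rw [hc2]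
    exact stepPS_tbl N K i j hi hj

theorem rowInit (N K i : Nat) (hi : i < N) (hK : 1 ≤ K) :
    pvSet2 (tbl N K (fun a b => if a < i then Rr a b else 0)) i 0
      (pvGet2 (tbl N K Qn) i 0) = tbl N K (hR i 0) := by
  rw [tbl_get _ _ _ _ _ hi (by omega), tbl_set _ _ _ _ _ _ hi (by omega)]
  apply tbl_congr; intro a ha b hb
  by_cases hab : a = i ∧ b = 0
  · obtain ⟨rfl, rfl⟩ := hab
    rw [if_pos ⟨rfl, rfl⟩]; unfold hR
    rw [if_pos (Or.inr ⟨rfl, le_refl _⟩), Rr]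
  · rw [if_neg hab]; unfold hR
    split_ifs with h1 h2 <;> try rfl
    · exfalso; omega
    · exfalso; exact hab (by omega)

theorem outerPS (N K : Nat) (hK : 1 ≤ K) (i : Nat) (hi : i ≤ N) :
    (PySem.List.pyRange 0 (i : Int) 1).foldl
      (fun dp iv => (PySem.List.pyRange 1 (K : Int) 1).foldl
          (fun dp jv => stepPS (tbl N K Qn) dp iv jv)
        (pvSet2 dp iv.toNat 0 (pvGet2 (tbl N K Qn) iv.toNat 0)))
      (tbl N K (fun _ _ => 0)) = tbl N K (fun a b => if a < i then Rr a b else 0) := by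
  induction i with
  | zero =>
    simp only [Nat.cast_zero]
    rw [PySem.List.pyRange_one_eq_nil (le_refl 0), List.foldl_nil]
    apply tbl_congr; intro a ha b hb
    rw [if_neg (by omega)]
  | succ i ih =>
    have hc : ((i + 1 : Nat) : Int) = (i : Int) + 1 := by push_cast; ring
    rw [hc, PySem.List.pyRange_one_succ_right (by omega : (0 : Int) ≤ (i : Int)),
      List.foldl_append, ih (by omega), List.foldl_cons, List.foldl_nil]
    have e1 : ((i : Int)).toNat = i := by omega
    rw [e1, rowInit N K i (by omega) hK]
    have hK1 : (K : Int) = ((K - 1 : Nat) : Int) + 1 := by omega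
    rw [hK1, rowPS N K i (by omega) (K - 1) (by omega)]
    apply tbl_congr; intro a ha b hb
    unfold hR
    split_ifs with h1 h2 <;> try rfl
    · exfalso; omega
    · exfalso; omega

theorem B_eq_tbl (N K : Nat) (_hN : 1 ≤ N) (hK : 1 ≤ K) :
    (PySem.List.pyRange 0 (N : Int) 1).foldl
      (fun dp i => (PySem.List.pyRange 1 (K : Int) 1).foldl
          (fun dp j => stepPS (tbl N K Qn) dp i j)
        (pvSet2 dp i.toNat 0 (pvGet2 (tbl N K Qn) i.toNat 0)))
      (List.replicate N (List.replicate K (0 : Int))) = tbl N K P := by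
  rw [tbl_init, outerPS N K hK N (le_refl N)]
  apply tbl_congr; intro a ha b hb
  rw [if_pos ha, P_eq_Rr]

-- ===== VERDICT (by name: the statement is the Claim_ definition above) =====
theorem getPartitionTable_spec : Claim_equal_getPartitionTable := by
  intro n k _hd hpre
  obtain ⟨hn, hk⟩ := hpre
  have hN : (n + 1).toNat = n.toNat + 1 := by omega
  have hK : (k + 1).toNat = k.toNat + 1 := by omega
  have hn1 : n + 1 = ((n.toNat + 1 : Nat) : Int) := by omega
  have hk1 : k + 1 = ((k.toNat + 1 : Nat) : Int) := by omega
  have hq : qTable n k = tbl (n.toNat + 1) (k.toNat + 1) Qn := by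
    unfold qTable
    rw [hN, hK, hn1, hk1, Q_eq_tbl _ _ (by omega) (by omega)]
  unfold Spec_getPartitionTable getPartitionTable getPartitionTable_alt
  rw [hq, hN, hK, hn1, hk1, A_eq_tbl _ _ (by omega) (by omega),
    B_eq_tbl _ _ (by omega) (by omega)]
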